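-- pv_equiv track=rewrite | github.com/mike-wise/kit-exts-spawn-prims | exts/omni.example.spawn_prims/omni/example/spawn_prims/ovut.py | CalcQuadsAndPrims
-- ===== SOURCE A (Python) =====
-- def CalcQuadsAndPrims(depth: int, nring: int, nlat: int, nlng: int):
--     totquads = 0
--     totprims = 0
--     for i in range(depth+1):
--         nspheres = nring**(i)
--         nquads = nspheres * nlat * nlng
--         totquads += nquads
--         totprims += nspheres
--     return totquads, totprims
-- ===== SOURCE B (Python) =====
-- def CalcQuadsAndPrims(depth: int, nring: int, nlat: int, nlng: int):
--     # closed-form geometric series instead of the loop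
--     if depth < 0:
--         return (0, 0)
--     if nring == 1:
--         s = depth + 1
--     else:
--         s = (nring ** (depth + 1) - 1) // (nring - 1)
--     return (s * nlat * nlng, s)
-- ===== Notes on version B (the rewrite author's own statement) =====
-- stated objective: faster
-- what changed: Replaces A's loop that accumulates nring^i for i=0..depth with the closed-form geometric series (nring^(depth+1)-1)//(nring-1), special-casing nring==1 and negative depth.
import Mathlib
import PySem

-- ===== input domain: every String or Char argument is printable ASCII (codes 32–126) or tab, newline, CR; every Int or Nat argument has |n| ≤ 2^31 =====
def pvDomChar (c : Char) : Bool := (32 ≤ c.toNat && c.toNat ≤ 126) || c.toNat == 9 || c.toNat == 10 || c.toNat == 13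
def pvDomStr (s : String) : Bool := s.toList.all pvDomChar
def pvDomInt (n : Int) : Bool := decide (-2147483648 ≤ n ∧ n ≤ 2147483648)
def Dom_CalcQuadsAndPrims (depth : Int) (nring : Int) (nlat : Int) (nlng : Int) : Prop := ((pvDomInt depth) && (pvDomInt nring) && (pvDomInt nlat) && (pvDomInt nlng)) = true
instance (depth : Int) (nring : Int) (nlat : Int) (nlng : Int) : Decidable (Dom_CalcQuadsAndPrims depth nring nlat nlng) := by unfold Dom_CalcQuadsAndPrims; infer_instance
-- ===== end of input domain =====

-- B replaces A's O(depth) accumulation loop by the closed-form geometric series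
-- (nring^(depth+1)-1)//(nring-1) (special cases: nring = 1 and negative depth).

-- ===== PORT A =====
def CalcQuadsAndPrims (depth : Int) (nring : Int) (nlat : Int) (nlng : Int) : Int × Int :=
  let st :=
    (PySem.List.pyRange 0 (depth + 1) 1).foldl
      (fun (st : Int × Int) (i : Int) =>
        let nspheres := nring ^ i.toNat
        let nquads := nspheres * nlat * nlng
        (st.1 + nquads, st.2 + nspheres))
      (0, 0)
  (st.1, st.2)

-- ===== PORT B =====
def CalcQuadsAndPrims_alt (depth : Int) (nring : Int) (nlat : Int) (nlng : Int) : Int × Int :=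
  if depth < 0 then (0, 0)
  else
    let s : Int :=
      if nring = 1 then depth + 1
      else PySem.Int.floordiv (nring ^ (depth + 1).toNat - 1) (nring - 1)
    (s * nlat * nlng, s)

-- ===== PRECONDITION & SPEC =====
def Spec_CalcQuadsAndPrims (depth : Int) (nring : Int) (nlat : Int) (nlng : Int) (out : Int × Int) : Prop := out = CalcQuadsAndPrims_alt depth nring nlat nlng
instance (depth : Int) (nring : Int) (nlat : Int) (nlng : Int) (out : Int × Int) : Decidable (Spec_CalcQuadsAndPrims depth nring nlat nlng out) := by unfold Spec_CalcQuadsAndPrims; infer_instance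

-- ===== CLAIM (what is proved, stated in full; the proofs are below) =====
def Claim_equal_CalcQuadsAndPrims : Prop := ∀ (depth : Int) (nring : Int) (nlat : Int) (nlng : Int), Dom_CalcQuadsAndPrims depth nring nlat nlng → Spec_CalcQuadsAndPrims depth nring nlat nlng (CalcQuadsAndPrims depth nring nlat nlng)

-- ===== LEMMAS AND PROOFS =====

-- the partial geometric sum maintained by A's loop
def geomS (r : Int) (m : Nat) : Int := ∑ i ∈ Finset.range m, r ^ i

theorem foldA_eq (r lat lng : Int) (m : Nat) (q p : Int) :
    (PySem.List.pyRange 0 (m : Int) 1).foldl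
      (fun (st : Int × Int) (i : Int) =>
        (st.1 + r ^ i.toNat * lat * lng, st.2 + r ^ i.toNat)) (q, p)
    = (q + geomS r m * lat * lng, p + geomS r m) := by
  induction m generalizing q p with
  | zero => simp [geomS]
  | succ n ih =>
      have h : PySem.List.pyRange 0 ((n : Int) + 1) 1
          = PySem.List.pyRange 0 (n : Int) 1 ++ [(n : Int)] :=
        PySem.List.pyRange_one_succ_right (by positivity)
      push_cast
      rw [h, List.foldl_append, ih]
      simp [geomS, Finset.sum_range_succ]
      constructor <;> ring

theorem geomS_closed (r : Int) (m : Nat) (hr : r ≠ 1) :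
    geomS r m = PySem.Int.floordiv (r ^ m - 1) (r - 1) := by
  have hmul : geomS r m * (r - 1) = r ^ m - 1 := geom_sum_mul r m
  have hb : r - 1 ≠ 0 := sub_ne_zero.mpr hr
  rw [← hmul]
  unfold PySem.Int.floordiv
  rw [Int.mul_fdiv_cancel _ hb]

theorem CalcQuadsAndPrims_eq (depth nring nlat nlng : Int) :
    CalcQuadsAndPrims depth nring nlat nlng = CalcQuadsAndPrims_alt depth nring nlat nlng := by
  unfold CalcQuadsAndPrims CalcQuadsAndPrims_alt
  by_cases hd : depth < 0
  · rw [PySem.List.pyRange_one_eq_nil (by omega)]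
    simp [hd]
  · set m := (depth + 1).toNat with hmdef
    have hm : depth + 1 = (m : Int) := by omega
    rw [hm, foldA_eq]
    simp only [if_neg hd, zero_add]
    by_cases hr : nring = 1
    · subst hr
      simp [geomS]
    · rw [geomS_closed nring m hr, if_neg hr]

-- ===== VERDICT (by name: the statement is the Claim_ definition above) =====
theorem CalcQuadsAndPrims_spec : Claim_equal_CalcQuadsAndPrims := by
  intro depth nring nlat nlng _
  exact CalcQuadsAndPrims_eq depth nring nlat nlng
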